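-- pv_equiv track=rewrite | github.com/johnwroge/DSA | Algorithms/greedy-algorithms/interval-scheduling.py | scheduler_with_deadlines
-- ===== SOURCE A (Python) =====
-- def scheduler_with_deadlines(tasks):
--     """
--     Schedule tasks with deadlines to minimize lateness
--     tasks: list of (duration, deadline) tuples
--     Greedy: sort by deadline (Earliest Deadline First)
--     """
--     if not tasks:
--         return []
--
--     # Sort by deadline
--     indexed_tasks = [(tasks[i], i) for i in range(len(tasks))]
--     indexed_tasks.sort(key=lambda x: x[0][1])
--
--     schedule = []
--     current_time = 0
--
--     for (duration, deadline), original_idx in indexed_tasks: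
--         start_time = current_time
--         finish_time = current_time + duration
--         lateness = max(0, finish_time - deadline)
--
--         schedule.append({
--             'task_id': original_idx,
--             'start': start_time,
--             'finish': finish_time,
--             'deadline': deadline,
--             'lateness': lateness
--         })
--
--         current_time = finish_time
--
--     return schedule
-- ===== SOURCE B (Python) =====
-- def scheduler_with_deadlines(tasks):
--     """
--     Schedule tasks with deadlines to minimize lateness
--     tasks: list of (duration, deadline) tuples
--     Bucket decomposition: iterate the distinct deadlines in increasing order and,
--     for each, scan the task list and schedule its tasks in original order --
--     no sort of the tasks themselves, no (schedule, running-time) pair threaded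
--     through one combined loop over sorted tasks.
--     """
--     schedule = []
--     current_time = 0
--     for dl in sorted(set(deadline for _, deadline in tasks)):
--         for original_idx, (duration, task_deadline) in enumerate(tasks):
--             if task_deadline == dl:
--                 finish_time = current_time + duration
--                 schedule.append({
--                     'task_id': original_idx,
--                     'start': current_time,
--                     'finish': finish_time,
--                     'deadline': task_deadline,
--                     'lateness': max(0, finish_time - task_deadline),
--                 })
--                 current_time = finish_time
--     return schedule
-- ===== Notes on version B (the rewrite author's own statement) =====
-- stated objective: alternative
-- what changed: A sorts the indexed tasks by deadline and makes one pass threading (schedule, current_time); B never sorts the tasks: it iterates the distinct deadlines (sorted(set(...))) in increasing order and, for each, scans the task list and schedules its tasks in original order (bucket/group-by decomposition; correct because a stable sort by deadline is exactly group-by-deadline in key order).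
import Mathlib
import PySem

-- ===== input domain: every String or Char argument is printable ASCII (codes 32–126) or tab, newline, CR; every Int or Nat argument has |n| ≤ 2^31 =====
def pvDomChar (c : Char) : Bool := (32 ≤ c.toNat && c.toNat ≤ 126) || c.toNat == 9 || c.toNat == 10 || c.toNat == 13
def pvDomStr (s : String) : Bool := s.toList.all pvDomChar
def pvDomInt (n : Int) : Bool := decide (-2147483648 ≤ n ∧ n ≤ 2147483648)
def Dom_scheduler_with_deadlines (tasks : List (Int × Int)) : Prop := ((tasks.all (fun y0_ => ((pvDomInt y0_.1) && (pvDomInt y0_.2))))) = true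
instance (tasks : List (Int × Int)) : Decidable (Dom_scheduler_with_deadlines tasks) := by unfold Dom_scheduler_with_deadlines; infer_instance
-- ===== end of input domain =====

-- B replaces A's sort-the-tasks-then-one-pass loop by a bucket decomposition: iterate the
-- distinct deadlines in increasing order and scan the task list once per deadline; alternative
-- structure, same values (stable EDF order = group-by-deadline in original order).

-- ===== PORT A =====
def scheduler_with_deadlines (tasks : List (Int × Int)) : List (List (String × Int)) :=
  if tasks = [] then []
  else
    -- indexed_tasks = [(tasks[i], i) for i in range(len(tasks))], then .sort(key=lambda x: x[0][1])
    let indexed := (PySem.List.pyRange 0 (tasks.length : Int) 1).map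
      (fun i => (PySem.List.pyGetD tasks i (0, 0), i))
    let sortedTasks := PySem.List.sorted indexed (fun x => x.1.2) false
    -- loop with (schedule, current_time) state
    (sortedTasks.foldl
      (fun (st : List (List (String × Int)) × Int) p =>
        let duration := p.1.1
        let deadline := p.1.2
        let original_idx := p.2
        let start_time := st.2
        let finish_time := st.2 + duration
        let lateness := max 0 (finish_time - deadline)
        (st.1 ++ [[("task_id", original_idx), ("start", start_time), ("finish", finish_time),
                   ("deadline", deadline), ("lateness", lateness)]],
         finish_time))
      ([], 0)).1

-- ===== PORT B =====
def scheduler_with_deadlines_alt (tasks : List (Int × Int)) : List (List (String × Int)) :=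
  -- for dl in sorted(set(deadline for _, deadline in tasks)):
  --   for original_idx, (duration, task_deadline) in enumerate(tasks):
  --     if task_deadline == dl: append row; current_time = finish_time
  ((PySem.List.sorted (PySem.Set.ofList (tasks.map (fun t => t.2))) (fun x => x) false).foldl
    (fun (st : List (List (String × Int)) × Int) dl =>
      (PySem.List.enumerate tasks 0).foldl
        (fun (st : List (List (String × Int)) × Int) p =>
          if p.2.2 = dl then
            let finish_time := st.2 + p.2.1
            (st.1 ++ [[("task_id", p.1), ("start", st.2), ("finish", finish_time),
                       ("deadline", p.2.2), ("lateness", max 0 (finish_time - p.2.2))]],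
             finish_time)
          else st)
        st)
    ([], 0)).1

-- ===== PRECONDITION & SPEC =====
def Spec_scheduler_with_deadlines (tasks : List (Int × Int)) (out : List (List (String × Int))) : Prop := out = scheduler_with_deadlines_alt tasks
instance (tasks : List (Int × Int)) (out : List (List (String × Int))) : Decidable (Spec_scheduler_with_deadlines tasks out) := by unfold Spec_scheduler_with_deadlines; infer_instance

-- ===== CLAIM (what is proved, stated in full; the proofs are below) =====
def Claim_equal_scheduler_with_deadlines : Prop := ∀ (tasks : List (Int × Int)), Dom_scheduler_with_deadlines tasks → Spec_scheduler_with_deadlines tasks (scheduler_with_deadlines tasks)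

-- ===== LEMMAS AND PROOFS =====

-- the common semantic core: EDF rows from current time c over the (idx, (dur, dl)) list
def pvRows (c : Int) : List (Int × (Int × Int)) → List (List (String × Int))
  | [] => []
  | (i, (d, dl)) :: rest =>
      [("task_id", i), ("start", c), ("finish", c + d),
       ("deadline", dl), ("lateness", max 0 (c + d - dl))] :: pvRows (c + d) rest

def pvDurSum (L : List (Int × (Int × Int))) : Int := (L.map (fun p => p.2.1)).sum

lemma pvRows_append (L M : List (Int × (Int × Int))) :
    ∀ c, pvRows c (L ++ M) = pvRows c L ++ pvRows (c + pvDurSum L) M := by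
  induction L with
  | nil => intro c; simp [pvRows, pvDurSum]
  | cons x t ih =>
      intro c
      obtain ⟨i, d, dl⟩ := x
      simp only [List.cons_append, pvRows, ih, pvDurSum, List.map_cons, List.sum_cons]
      ring_nf

-- ===== A side =====

-- swap pairing between A's (task, idx) and B's (idx, task)
def pvSwap (p : Int × (Int × Int)) : (Int × Int) × Int := (p.2, p.1)

lemma insertBy_map_swap (x : Int × (Int × Int)) (ys : List (Int × (Int × Int))) :
    PySem.List.insertBy (fun a b => decide (a.1.2 < b.1.2)) (pvSwap x) (ys.map pvSwap)
      = (PySem.List.insertBy (fun a b => decide (a.2.2 < b.2.2)) x ys).map pvSwap := by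
  induction ys with
  | nil => rfl
  | cons y t ih =>
      simp only [List.map_cons, PySem.List.insertBy, pvSwap]
      split_ifs <;> simp_all [pvSwap]

lemma sorted_map_swap (xs : List (Int × (Int × Int))) :
    PySem.List.sorted (xs.map pvSwap) (fun p => p.1.2) false
      = (PySem.List.sorted xs (fun it => it.2.2) false).map pvSwap := by
  rw [PySem.List.sorted_eq_foldl_insertBy, PySem.List.sorted_eq_foldl_insertBy, List.foldl_map]
  have : ∀ (acc : List (Int × (Int × Int))),
      xs.foldl (fun acc x => PySem.List.insertBy (fun a b => decide (a.1.2 < b.1.2)) (pvSwap x) acc) (acc.map pvSwap)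
        = (xs.foldl (fun acc x => PySem.List.insertBy (fun a b => decide (a.2.2 < b.2.2)) x acc) acc).map pvSwap := by
    induction xs with
    | nil => intro acc; rfl
    | cons x t ih =>
        intro acc
        simp only [List.foldl_cons, insertBy_map_swap]
        exact ih _
  simpa using this []

-- A's fold over the swapped list produces acc ++ pvRows c L
lemma foldA_eq_rows (L : List (Int × (Int × Int))) :
    ∀ (acc : List (List (String × Int))) (c : Int),
    ((L.map pvSwap).foldl
      (fun (st : List (List (String × Int)) × Int) p =>
        (st.1 ++ [[("task_id", p.2), ("start", st.2), ("finish", st.2 + p.1.1),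
                   ("deadline", p.1.2), ("lateness", max 0 (st.2 + p.1.1 - p.1.2))]],
         st.2 + p.1.1))
      (acc, c)).1 = acc ++ pvRows c L := by
  induction L with
  | nil => intro acc c; simp [pvRows]
  | cons x t ih =>
      intro acc c
      obtain ⟨i, d, dl⟩ := x
      simp only [List.map_cons, List.foldl_cons, pvSwap, pvRows, ih]
      simp

-- ===== stable sort = group-by-key lemmas =====

-- inserting x passes over any block whose elements do not trigger `before`
lemma insertBy_append_of_not_before {α : Type} (bef : α → α → Bool) (x : α)
    (l1 l2 : List α) (h : ∀ y ∈ l1, bef x y = false) :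
    PySem.List.insertBy bef x (l1 ++ l2) = l1 ++ PySem.List.insertBy bef x l2 := by
  induction l1 with
  | nil => simp
  | cons y t ih =>
      simp only [List.cons_append, PySem.List.insertBy, h y (by simp)]
      simp only [Bool.false_eq_true, if_false, List.cons_inj_right]
      exact ih (fun z hz => h z (by simp [hz]))

-- x lands at the very front when it goes before every element
lemma insertBy_all_before {α : Type} (bef : α → α → Bool) (x : α)
    (l : List α) (h : ∀ y ∈ l, bef x y = true) :
    PySem.List.insertBy bef x l = x :: l := by
  cases l with
  | nil => rfl
  | cons y t => simp [PySem.List.insertBy, h y (by simp)]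

-- inserting one more element into the groups when its key is already a group key
lemma insert_groups_of_mem {α : Type} (key : α → Int) (x : α) (g : Int → List α)
    (hg : ∀ k, ∀ a ∈ g k, key a = k) :
    ∀ (ks : List Int), ks.Pairwise (· < ·) → key x ∈ ks →
    PySem.List.insertBy (fun a b => decide (key a < key b)) x (ks.flatMap g)
      = ks.flatMap (fun k => g k ++ if key x = k then [x] else []) := by
  intro ks
  induction ks with
  | nil => intro _ hx; cases hx
  | cons k rest ih =>
      intro hp hx
      have hrest : ∀ k' ∈ rest, k < k' := fun k' hk' => (List.pairwise_cons.mp hp).1 k' hk'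
      by_cases hk : key x = k
      · -- pass over g k (its elements tie with x), then x goes before everything in rest
        rw [List.flatMap_cons, insertBy_append_of_not_before _ _ _ _
            (fun y hy => by simp [hg k y hy, hk])]
        rw [insertBy_all_before _ _ _ (fun y hy => by
          obtain ⟨k', hk', hyk'⟩ := List.mem_flatMap.mp hy
          have := hg k' y hyk'
          simp [this, hk]
          exact hrest k' hk')]
        have hcong : rest.flatMap (fun k' => g k' ++ if key x = k' then [x] else [])
            = rest.flatMap g := by
          apply List.flatMap_congr
          intro k' hk'
          have : key x ≠ k' := by have := hrest k' hk'; omega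
          simp [this]
        simp only [List.flatMap_cons, hcong, if_pos hk]
        simp
      · -- key x ∈ rest, so k < key x: pass over g k, recurse
        have hxr : key x ∈ rest := by
          rcases List.mem_cons.mp hx with h | h
          · exact absurd h hk
          · exact h
        have hklt : k < key x := hrest _ hxr
        rw [List.flatMap_cons, insertBy_append_of_not_before _ _ _ _
            (fun y hy => by simp [hg k y hy]; omega)]
        rw [ih (List.pairwise_cons.mp hp).2 hxr]
        simp only [List.flatMap_cons, if_neg hk]
        simp

-- inserting one more element into the groups when its key is new
lemma insert_groups_of_not_mem {α : Type} (key : α → Int) (x : α) (g : Int → List α)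
    (hg : ∀ k, ∀ a ∈ g k, key a = k) (hempty : g (key x) = []) :
    ∀ (ks : List Int), ks.Pairwise (· < ·) → key x ∉ ks →
    PySem.List.insertBy (fun a b => decide (key a < key b)) x (ks.flatMap g)
      = (PySem.List.insertBy (fun a b => decide (a < b)) (key x) ks).flatMap
          (fun k => g k ++ if key x = k then [x] else []) := by
  intro ks
  induction ks with
  | nil =>
      intro _ _
      simp [PySem.List.insertBy, hempty]
  | cons k rest ih =>
      intro hp hx
      have hrest : ∀ k' ∈ rest, k < k' := fun k' hk' => (List.pairwise_cons.mp hp).1 k' hk'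
      have hk : key x ≠ k := fun h => hx (by simp [h])
      by_cases hlt : key x < k
      · -- x goes before everything
        rw [insertBy_all_before _ _ _ (fun y hy => by
          obtain ⟨k', hk', hyk'⟩ := List.mem_flatMap.mp hy
          have := hg k' y hyk'
          rcases List.mem_cons.mp hk' with h | h
          · simp [this, h]; omega
          · have := hrest k' h; simp [hg k' y hyk']; omega)]
        have h1 : PySem.List.insertBy (fun a b => decide (a < b)) (key x) (k :: rest)
            = key x :: k :: rest := by simp [PySem.List.insertBy, hlt]
        have hcong : (k :: rest).flatMap (fun k' => g k' ++ if key x = k' then [x] else [])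
            = (k :: rest).flatMap g := by
          apply List.flatMap_congr
          intro k' hk'
          have : key x ≠ k' := by
            rcases List.mem_cons.mp hk' with h | h
            · simp [h, hk]
            · have := hrest k' h; omega
          simp [this]
        rw [h1]
        simp only [List.flatMap_cons] at hcong
        simp only [List.flatMap_cons, hempty, hcong]
        simp
      · -- k < key x: pass over g k, recurse
        have hklt : k < key x := by omega
        rw [List.flatMap_cons, insertBy_append_of_not_before _ _ _ _
            (fun y hy => by simp [hg k y hy]; omega)]
        rw [ih (List.pairwise_cons.mp hp).2 (fun h => hx (by simp [h]))]
        have h1 : PySem.List.insertBy (fun a b => decide (a < b)) (key x) (k :: rest)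
            = k :: PySem.List.insertBy (fun a b => decide (a < b)) (key x) rest := by
          simp [PySem.List.insertBy]; omega
        rw [h1]
        simp only [List.flatMap_cons, if_neg hk]
        simp

-- sorted of one more element appended = insert it into the sorted list
lemma sorted_append_singleton {α : Type} (key : α → Int) (ys : List α) (x : α) :
    PySem.List.sorted (ys ++ [x]) key false
      = PySem.List.insertBy (fun a b => decide (key a < key b)) x (PySem.List.sorted ys key false) := by
  rw [PySem.List.sorted_eq_foldl_insertBy, PySem.List.sorted_eq_foldl_insertBy, List.foldl_append]
  rfl

-- MASTER: Python's stable sort by an Int key = concatenation, over the distinct keys in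
-- increasing order, of the original-order groups with that key
lemma stable_sort_eq_groupby {α : Type} (key : α → Int) (ys : List α) :
    PySem.List.sorted ys key false
      = (PySem.List.sorted (PySem.Set.ofList (ys.map key)) (fun x => x) false).flatMap
          (fun k => ys.filter (fun a => decide (key a = k))) := by
  induction ys using List.reverseRecOn with
  | nil => rfl
  | append_singleton ys x ih =>
      rw [sorted_append_singleton, ih]
      have hset : PySem.Set.ofList ((ys ++ [x]).map key)
          = PySem.Set.add (PySem.Set.ofList (ys.map key)) (key x) := by
        rw [List.map_append, PySem.Set.ofList_eq_foldl, List.foldl_append,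
            ← PySem.Set.ofList_eq_foldl]
        rfl
      set S := PySem.Set.ofList (ys.map key) with hS
      set ks := PySem.List.sorted S (fun x => x) false with hks
      have hpair : ks.Pairwise (· < ·) := PySem.List.sorted_ofList_pairwise_lt _
      have hmemks : ∀ k, k ∈ ks ↔ k ∈ ys.map key := by
        intro k
        rw [hks, PySem.List.mem_sorted, hS, PySem.Set.mem_ofList]
      have hfilter : ∀ k, (ys ++ [x]).filter (fun a => decide (key a = k))
          = ys.filter (fun a => decide (key a = k)) ++ if key x = k then [x] else [] := by
        intro k
        rw [List.filter_append]
        congr 1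
        by_cases h : key x = k <;> simp [h]
      by_cases hx : key x ∈ ys.map key
      · -- key already present: the distinct-keys list is unchanged
        have hadd : PySem.Set.add S (key x) = S := by
          have hmemS : key x ∈ S := (PySem.Set.mem_ofList _ _).mpr hx
          have hcont : S.contains (key x) = true := by
            simp only [PySem.Set.contains]
            simpa using hmemS
          simp only [PySem.Set.add, hcont]
          simp
        rw [hset, hadd, ← hks]
        rw [insert_groups_of_mem key x _ (fun k a ha => by
              have := (List.mem_filter.mp ha).2; simpa using this)
            ks hpair ((hmemks _).mpr hx)]
        apply List.flatMap_congr
        intro k hk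
        rw [hfilter k]
      · -- new key: it is inserted into the distinct-keys list
        have hadd : PySem.Set.add S (key x) = S ++ [key x] := by
          have hnmemS : key x ∉ S := fun h => hx ((PySem.Set.mem_ofList _ _).mp h)
          have hcont : S.contains (key x) = false := by
            simp only [PySem.Set.contains]
            simpa using hnmemS
          simp only [PySem.Set.add, hcont]
          simp
        rw [hset, hadd, sorted_append_singleton, ← hks]
        have hid : (fun a b : Int => decide (a < b)) = (fun a b : Int => decide ((fun x => x) a < (fun x => x) b)) := rfl
        rw [insert_groups_of_not_mem key x _ (fun k a ha => by
              have := (List.mem_filter.mp ha).2; simpa using this)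
            (by rw [List.filter_eq_nil_iff]; intro a ha; simp; intro h; exact hx (h ▸ List.mem_map_of_mem ha))
            ks hpair (fun h => hx ((hmemks _).mp h))]
        apply List.flatMap_congr
        intro k hk
        rw [hfilter k]

-- ===== B side =====

-- one inner scan appends exactly the rows of this deadline's group
lemma foldB_inner (dl : Int) (L : List (Int × (Int × Int))) :
    ∀ (acc : List (List (String × Int))) (c : Int),
    (L.foldl
      (fun (st : List (List (String × Int)) × Int) p =>
        if p.2.2 = dl then
          (st.1 ++ [[("task_id", p.1), ("start", st.2), ("finish", st.2 + p.2.1),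
                     ("deadline", p.2.2), ("lateness", max 0 (st.2 + p.2.1 - p.2.2))]],
           st.2 + p.2.1)
        else st)
      (acc, c))
      = (acc ++ pvRows c (L.filter (fun p => decide (p.2.2 = dl))),
         c + pvDurSum (L.filter (fun p => decide (p.2.2 = dl)))) := by
  induction L with
  | nil => intro acc c; simp [pvRows, pvDurSum]
  | cons x t ih =>
      intro acc c
      obtain ⟨i, d, dl'⟩ := x
      by_cases h : dl' = dl
      · subst h
        simp only [List.foldl_cons, List.filter_cons, decide_true, ite_true, ih, pvDurSum, List.map_cons, List.sum_cons, Prod.mk.injEq]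
        constructor
        · simp [pvRows]
        · ring
      · simp only [List.foldl_cons, List.filter_cons]
        simp only [if_neg h, decide_eq_true_eq, ih]

-- the outer loop over the distinct deadlines builds the rows of the grouped list
lemma foldB_outer (L : List (Int × (Int × Int))) :
    ∀ (ks : List Int) (acc : List (List (String × Int))) (c : Int),
    (ks.foldl
      (fun (st : List (List (String × Int)) × Int) dl =>
        L.foldl
          (fun (st : List (List (String × Int)) × Int) p =>
            if p.2.2 = dl then
              (st.1 ++ [[("task_id", p.1), ("start", st.2), ("finish", st.2 + p.2.1),
                         ("deadline", p.2.2), ("lateness", max 0 (st.2 + p.2.1 - p.2.2))]],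
               st.2 + p.2.1)
            else st)
          st)
      (acc, c))
      = (acc ++ pvRows c (ks.flatMap (fun k => L.filter (fun p => decide (p.2.2 = k)))),
         c + pvDurSum (ks.flatMap (fun k => L.filter (fun p => decide (p.2.2 = k))))) := by
  intro ks
  induction ks with
  | nil => intro acc c; simp [pvRows, pvDurSum]
  | cons k rest ih =>
      intro acc c
      simp only [List.foldl_cons, foldB_inner, ih, List.flatMap_cons, pvRows_append,
        Prod.mk.injEq]
      constructor
      · simp
      · simp [pvDurSum]; ring

-- enumerate's deadline projection is the task list's deadline projection
lemma enum_map_dl (tasks : List (Int × Int)) :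
    ∀ s, (PySem.List.enumerate tasks s).map (fun p => p.2.2) = tasks.map (fun t => t.2) := by
  induction tasks with
  | nil => intro s; rfl
  | cons t rest ih => intro s; simp [PySem.List.enumerate, ih]

-- ===== VERDICT (by name: the statement is the Claim_ definition above) =====
theorem scheduler_with_deadlines_spec : Claim_equal_scheduler_with_deadlines := by
  intro tasks _
  unfold Spec_scheduler_with_deadlines scheduler_with_deadlines scheduler_with_deadlines_alt
  have hB :
      ((PySem.List.sorted (PySem.Set.ofList (tasks.map (fun t => t.2))) (fun x => x) false).foldl
        (fun (st : List (List (String × Int)) × Int) dl =>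
          (PySem.List.enumerate tasks 0).foldl
            (fun (st : List (List (String × Int)) × Int) p =>
              if p.2.2 = dl then
                (st.1 ++ [[("task_id", p.1), ("start", st.2), ("finish", st.2 + p.2.1),
                           ("deadline", p.2.2), ("lateness", max 0 (st.2 + p.2.1 - p.2.2))]],
                 st.2 + p.2.1)
              else st)
            st)
        ([], 0)).1
      = pvRows 0 (PySem.List.sorted (PySem.List.enumerate tasks 0) (fun it => it.2.2) false) := by
    rw [foldB_outer]
    rw [← enum_map_dl tasks 0,
        stable_sort_eq_groupby (fun p => p.2.2) (PySem.List.enumerate tasks 0)]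
    simp
  by_cases h : tasks = []
  · subst h
    simp only [reduceIte]
    rw [hB]
    rfl
  · simp only [if_neg h]
    rw [hB]
    have hind : (PySem.List.pyRange 0 (tasks.length : Int) 1).map
        (fun i => (PySem.List.pyGetD tasks i (0, 0), i))
        = (PySem.List.enumerate tasks 0).map pvSwap := by
      rw [PySem.List.enumerate_eq_map_pyRange (d := (0, 0)), List.map_map]
      rfl
    rw [hind, sorted_map_swap, foldA_eq_rows]
    simp
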